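-- pv_equiv track=rewrite | github.com/321Astari123/algorithms_practicum | FibonacciApp.py | calculate
-- ===== SOURCE A (Python) =====
-- def calculate(n):
--     if n == 0:
--         return "even"
--     elif n == 1:
--         return "odd"
--
--     a, b = 0, 1
--     for _ in range(n - 1):
--         a, b = b, (a + b) % 10  # Сохраняем только последнюю цифру
--     return "even" if b % 2 == 0 else "odd"
-- ===== SOURCE B (Python) =====
-- def calculate(n):
--     # Fibonacci parity has period 3: F(n) is even iff n is a multiple of 3.
--     return "even" if n % 3 == 0 else "odd"
-- ===== Notes on version B (the rewrite author's own statement) =====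
-- stated objective: faster
-- what changed: Replaces the O(n) last-digit Fibonacci loop with the closed-form period-3 parity rule: F(n) is even iff n % 3 == 0.
-- intended difference: For negative multiples of 3 A returns 'odd' (its loop never runs and the leftover state b=1 is reported) while B returns 'even', which is the parity of the negafibonacci value F(n) and the intended answer. — e.g. on calculate(-3): A returns "odd", B returns "even"
import Mathlib
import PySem

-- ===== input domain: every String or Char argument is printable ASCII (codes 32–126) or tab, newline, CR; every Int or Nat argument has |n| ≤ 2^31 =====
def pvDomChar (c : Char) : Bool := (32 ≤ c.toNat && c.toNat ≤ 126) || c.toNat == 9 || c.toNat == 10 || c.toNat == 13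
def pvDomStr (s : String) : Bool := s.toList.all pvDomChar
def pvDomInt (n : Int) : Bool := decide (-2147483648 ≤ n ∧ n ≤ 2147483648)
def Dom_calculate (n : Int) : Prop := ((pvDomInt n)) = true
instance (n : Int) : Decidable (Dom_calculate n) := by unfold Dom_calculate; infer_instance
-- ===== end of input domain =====

-- B replaces A's O(n) last-digit Fibonacci loop by the O(1) period-3 parity rule.

-- ===== PORT A =====
def calculate (n : Int) : String :=
  if n = 0 then "even"
  else if n = 1 then "odd"
  else
    let s := (PySem.List.pyRange 0 (n - 1) 1).foldl
      (fun (ab : Int × Int) _ => (ab.2, PySem.Int.mod (ab.1 + ab.2) 10)) (0, 1)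
    if PySem.Int.mod s.2 2 = 0 then "even" else "odd"

-- ===== PORT B =====
def calculate_alt (n : Int) : String :=
  if PySem.Int.mod n 3 = 0 then "even" else "odd"

-- ===== PRECONDITION & SPEC =====
-- For negative multiples of 3 A returns "odd" (its loop never runs, leaving b = 1)
-- while B returns "even", the parity of the negafibonacci value F(n) and the intended answer.
def D_calculate (n : Int) : Prop := n < 0 ∧ n % 3 = 0
instance (n : Int) : Decidable (D_calculate n) := by unfold D_calculate; infer_instance

def Spec_calculate (n : Int) (out : String) : Prop := ¬ D_calculate n → out = calculate_alt n
instance (n : Int) (out : String) : Decidable (Spec_calculate n out) := by unfold Spec_calculate; infer_instance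

def pvDiffWitness_calculate : Int := (-3)
def pvDiffWitnessOut_calculate : String × String := ("odd", "even")

-- ===== CLAIM (what is proved, stated in full; the proofs are below) =====
def Claim_unchanged_calculate : Prop := ∀ (n : Int), Dom_calculate n → Spec_calculate n (calculate n)
def Claim_changed_calculate : Prop := Dom_calculate (pvDiffWitness_calculate) ∧ D_calculate (pvDiffWitness_calculate) ∧ calculate (pvDiffWitness_calculate) = pvDiffWitnessOut_calculate.1 ∧ calculate_alt (pvDiffWitness_calculate) = pvDiffWitnessOut_calculate.2 ∧ pvDiffWitnessOut_calculate.1 ≠ pvDiffWitnessOut_calculate.2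
def Claim_exact_calculate : Prop := ∀ (n : Int), Dom_calculate n → D_calculate n → calculate n ≠ calculate_alt n

-- ===== LEMMAS AND PROOFS =====

-- the loop body of A
def pvStep (ab : Int × Int) (_ : Int) : Int × Int := (ab.2, PySem.Int.mod (ab.1 + ab.2) 10)

-- parity of the Fibonacci pair after the loop: period 3 in the number of iterations
lemma pvFold_parity (l : List Int) :
    ((l.foldl pvStep (0, 1)).1 % 2 = (if l.length % 3 = 0 then (0 : Int) else 1))
    ∧ ((l.foldl pvStep (0, 1)).2 % 2 = (if (l.length + 1) % 3 = 0 then (0 : Int) else 1)) := by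
  induction l using List.reverseRecOn with
  | nil => simp
  | append_singleton l x ih =>
    obtain ⟨h1, h2⟩ := ih
    rw [List.foldl_append]
    set s := l.foldl pvStep (0, 1) with hs
    set k := l.length with hk
    constructor
    · simpa [pvStep, Nat.add_mod] using h2
    · show PySem.Int.mod (s.1 + s.2) 10 % 2 = _
      rw [PySem.Int.mod_eq_emod_of_pos (by norm_num),
        Int.emod_emod_of_dvd _ (by norm_num : (2:Int) ∣ 10), Int.add_emod, h1, h2]
      simp only [List.length_append, List.length_singleton]
      have hk3 : k % 3 = 0 ∨ k % 3 = 1 ∨ k % 3 = 2 := by omega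
      rcases hk3 with h | h | h <;>
        simp [Nat.add_mod, h] <;> omega

lemma pvLoop_parity (n : Int) (hn : 2 ≤ n) :
    ((PySem.List.pyRange 0 (n - 1) 1).foldl pvStep (0, 1)).2 % 2
      = (if n % 3 = 0 then (0 : Int) else 1) := by
  have hk := (pvFold_parity (PySem.List.pyRange 0 (n - 1) 1)).2
  rw [PySem.List.length_pyRange_one] at hk
  rw [hk]
  have h1 : ((n - 1 - 0).toNat + 1) % 3 = 0 ↔ n % 3 = 0 := by
    have : ((n - 1 - 0).toNat : Int) = n - 1 := by omega
    omega
  by_cases h : n % 3 = 0 <;> simp [h] at h1 ⊢ <;> omega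

lemma pvCalc_of_ge_two (n : Int) (hn : 2 ≤ n) :
    calculate n = (if n % 3 = 0 then "even" else "odd") := by
  unfold calculate
  rw [if_neg (by omega), if_neg (by omega)]
  have hpar := pvLoop_parity n hn
  show (if PySem.Int.mod ((PySem.List.pyRange 0 (n - 1) 1).foldl pvStep (0, 1)).2 2 = 0
    then "even" else "odd") = _
  rw [PySem.Int.mod_eq_emod_of_pos (by norm_num : (0:Int) < 2), hpar]
  by_cases h : n % 3 = 0 <;> simp [h]

lemma pvCalc_of_neg (n : Int) (hn : n < 0) : calculate n = "odd" := by
  unfold calculate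
  rw [if_neg (by omega), if_neg (by omega),
    PySem.List.pyRange_one_eq_nil (by omega : n - 1 ≤ 0)]
  decide

-- ===== VERDICT (by name: the statement is the Claim_ definition above) =====
theorem calculate_spec : Claim_unchanged_calculate := by
  intro n _ hD
  unfold D_calculate at hD
  unfold calculate_alt
  rw [PySem.Int.mod_eq_emod_of_pos (by norm_num : (0:Int) < 3)]
  rcases lt_trichotomy n 0 with h | h | h
  · have h3 : ¬ n % 3 = 0 := by tauto
    rw [pvCalc_of_neg n h, if_neg h3]
  · subst h; decide
  · by_cases h1 : n = 1
    · subst h1; decide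
    · rw [pvCalc_of_ge_two n (by omega)]

theorem calculate_changed : Claim_changed_calculate := by
  unfold Claim_changed_calculate; decide

theorem calculate_tight : Claim_exact_calculate := by
  intro n _ hD
  obtain ⟨hn, h3⟩ := hD
  rw [pvCalc_of_neg n hn]
  unfold calculate_alt
  rw [PySem.Int.mod_eq_emod_of_pos (by norm_num : (0:Int) < 3), if_pos h3]
  decide
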